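-- pv_equiv track=rewrite | github.com/kevinyang372/algorithm-studies | amazon/optimal_device_utilization.py | optimalPair
-- ===== SOURCE A (Python) =====
-- def optimalPair(cap, foreground, background):
--
--     f = {i:v for (i, v) in foreground}
--     b = {i:v for (i, v) in background}
--
--     max_val = 0
--     max_lis = []
--
--     for i in f.keys():
--         for t in b.keys():
--             if f[i] + b[t] > max_val and f[i] + b[t] <= cap:
--                 max_val = f[i] + b[t]
--                 max_lis = [[i, t]]
--             elif f[i] + b[t] == max_val:
--                 max_lis.append([i, t])
--
--     return max_lis
-- ===== SOURCE B (Python) =====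
-- def optimalPair(cap, foreground, background):
--     # Sort b's values once; per foreground value a binary search finds the best
--     # partner, then a value->keys index enumerates the optimal pairs in order.
--     f = dict(foreground)
--     b = dict(background)
--     bvals = sorted(b.values())
--     n = len(bvals)
--     best = 0
--     for fv in f.values():
--         x = cap - fv
--         lo, hi = 0, n
--         while lo < hi:
--             mid = (lo + hi) // 2
--             if bvals[mid] <= x:
--                 lo = mid + 1
--             else:
--                 hi = mid
--         if lo > 0:
--             s = fv + bvals[lo - 1]
--             if s > best:
--                 best = s
--     groups = {}
--     for t, v in b.items():
--         groups.setdefault(v, []).append(t)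
--     return [[i, t] for i, fv in f.items() for t in groups.get(best - fv, [])]
-- ===== Notes on version B (the rewrite author's own statement) =====
-- stated objective: faster
-- what changed: Replaces the O(n*m) double loop over all key pairs by: sort b's values once, one binary search per foreground value to find the maximal admissible sum, then a value->keys index to emit the optimal pairs, O((n+m) log m + output).
import Mathlib
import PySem

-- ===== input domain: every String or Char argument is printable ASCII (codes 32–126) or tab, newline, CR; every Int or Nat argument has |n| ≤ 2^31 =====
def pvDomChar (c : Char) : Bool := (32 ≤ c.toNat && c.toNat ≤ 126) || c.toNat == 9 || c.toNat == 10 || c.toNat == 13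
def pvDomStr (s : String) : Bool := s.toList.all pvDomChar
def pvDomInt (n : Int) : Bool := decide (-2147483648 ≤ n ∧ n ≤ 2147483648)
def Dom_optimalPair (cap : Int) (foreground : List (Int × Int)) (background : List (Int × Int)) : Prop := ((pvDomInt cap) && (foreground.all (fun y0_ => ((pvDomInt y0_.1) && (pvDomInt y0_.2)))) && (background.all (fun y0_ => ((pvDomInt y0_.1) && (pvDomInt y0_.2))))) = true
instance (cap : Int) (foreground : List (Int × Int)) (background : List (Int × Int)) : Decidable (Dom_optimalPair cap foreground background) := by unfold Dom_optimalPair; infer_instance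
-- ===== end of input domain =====

-- B replaces A's O(n*m) double loop by sort + binary search for the best sum and a
-- value->keys index for the output (objective: faster).

-- ===== PORT A =====
def optimalPair (cap : Int) (foreground : List (Int × Int)) (background : List (Int × Int)) : List (List Int) :=
  let f := PySem.Dict.ofList foreground
  let b := PySem.Dict.ofList background
  let st := f.keys.foldl (fun st i =>
      b.keys.foldl (fun st t =>
        if f.getD i 0 + b.getD t 0 > st.1 ∧ f.getD i 0 + b.getD t 0 ≤ cap then
          (f.getD i 0 + b.getD t 0, [[i, t]])
        else if f.getD i 0 + b.getD t 0 = st.1 then (st.1, st.2 ++ [[i, t]])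
        else st) st)
    ((0 : Int), ([] : List (List Int)))
  st.2

-- ===== PORT B =====
-- the hand-written binary search of Source B (rightmost insertion point of x in arr);
-- the index mid is always in range, so getD is exact here
def bsr (arr : List Int) (x : Int) (lo hi : Nat) : Nat :=
  if h : lo < hi then
    let mid := (lo + hi) / 2
    if arr.getD mid 0 ≤ x then bsr arr x (mid + 1) hi
    else bsr arr x lo mid
  else lo
termination_by hi - lo
decreasing_by all_goals omega

def optimalPair_alt (cap : Int) (foreground : List (Int × Int)) (background : List (Int × Int)) : List (List Int) :=
  let f := PySem.Dict.ofList foreground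
  let b := PySem.Dict.ofList background
  let bvals := PySem.List.sorted b.values (fun v => v) false
  let n := bvals.length
  let best := f.values.foldl (fun best fv =>
      let r := bsr bvals (cap - fv) 0 n
      if r > 0 then
        let s := fv + bvals.getD (r - 1) 0
        if s > best then s else best
      else best) 0
  let groups := b.items.foldl (fun g q => g.modify q.2 [] (fun l => l ++ [q.1])) PySem.Dict.empty
  f.items.flatMap (fun p => (groups.getD (best - p.2) []).map (fun t => [p.1, t]))

-- ===== PRECONDITION & SPEC =====
def Spec_optimalPair (cap : Int) (foreground : List (Int × Int)) (background : List (Int × Int)) (out : List (List Int)) : Prop := out = optimalPair_alt cap foreground background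
instance (cap : Int) (foreground : List (Int × Int)) (background : List (Int × Int)) (out : List (List Int)) : Decidable (Spec_optimalPair cap foreground background out) := by unfold Spec_optimalPair; infer_instance

-- ===== CLAIM (what is proved, stated in full; the proofs are below) =====
def Claim_equal_optimalPair : Prop := ∀ (cap : Int) (foreground : List (Int × Int)) (background : List (Int × Int)), Dom_optimalPair cap foreground background → Spec_optimalPair cap foreground background (optimalPair cap foreground background)

-- ===== LEMMAS AND PROOFS =====

-- the loop body of A, over one (foreground item, background item) pair
def pvStep (cap : Int) (st : Int × List (List Int)) (pq : (Int × Int) × (Int × Int)) : Int × List (List Int) :=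
  if pq.1.2 + pq.2.2 > st.1 ∧ pq.1.2 + pq.2.2 ≤ cap then (pq.1.2 + pq.2.2, [[pq.1.1, pq.2.1]])
  else if pq.1.2 + pq.2.2 = st.1 then (st.1, st.2 ++ [[pq.1.1, pq.2.1]])
  else st

def pvBest (cap : Int) (mv : Int) (L : List ((Int × Int) × (Int × Int))) : Int :=
  L.foldl (fun m pq => if pq.1.2 + pq.2.2 > m ∧ pq.1.2 + pq.2.2 ≤ cap then pq.1.2 + pq.2.2 else m) mv

lemma pvBest_ge (cap : Int) (L : List ((Int × Int) × (Int × Int))) :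
    ∀ mv : Int, mv ≤ pvBest cap mv L := by
  induction L with
  | nil => intro mv; simp [pvBest]
  | cons pq t ih =>
    intro mv
    simp only [pvBest, List.foldl_cons]
    split_ifs with h
    · exact le_trans (le_of_lt h.1) (ih _)
    · exact ih _

lemma pvBest_cases (cap : Int) (L : List ((Int × Int) × (Int × Int))) :
    ∀ mv : Int, pvBest cap mv L = mv ∨
      ∃ pq ∈ L, pvBest cap mv L = pq.1.2 + pq.2.2 ∧ pvBest cap mv L ≤ cap := by
  induction L with
  | nil => intro mv; left; simp [pvBest]
  | cons pq t ih =>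
    intro mv
    simp only [pvBest, List.foldl_cons] at *
    split_ifs with h
    · rcases ih (pq.1.2 + pq.2.2) with h1 | ⟨q, hq, h1, h2⟩
      · exact Or.inr ⟨pq, by simp, h1, by rw [h1]; exact h.2⟩
      · exact Or.inr ⟨q, by simp [hq], h1, h2⟩
    · rcases ih mv with h1 | ⟨q, hq, h1, h2⟩
      · exact Or.inl h1
      · exact Or.inr ⟨q, by simp [hq], h1, h2⟩

lemma pvBest_ub (cap : Int) (L : List ((Int × Int) × (Int × Int))) :
    ∀ mv : Int, ∀ pq ∈ L, pq.1.2 + pq.2.2 ≤ cap → pq.1.2 + pq.2.2 ≤ pvBest cap mv L := by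
  induction L with
  | nil => intro mv pq h; simp at h
  | cons r t ih =>
    intro mv pq hmem hcap
    simp only [List.mem_cons] at hmem
    simp only [pvBest, List.foldl_cons] at *
    rcases hmem with rfl | hmem
    · split_ifs with h
      · exact pvBest_ge cap t _
      · rcases not_and_or.mp h with h | h
        · exact le_trans (le_of_not_gt h) (pvBest_ge cap t mv)
        · exact absurd hcap h
    · split_ifs with h
      · exact ih _ pq hmem hcap
      · exact ih _ pq hmem hcap

lemma pvBest_cons (cap mv : Int) (pq : (Int × Int) × (Int × Int)) (t : List ((Int × Int) × (Int × Int))) :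
    pvBest cap mv (pq :: t) = if pq.1.2 + pq.2.2 > mv ∧ pq.1.2 + pq.2.2 ≤ cap then pvBest cap (pq.1.2 + pq.2.2) t else pvBest cap mv t := by
  simp only [pvBest, List.foldl_cons]
  split_ifs <;> rfl

lemma foldl_pvStep (cap : Int) (L : List ((Int × Int) × (Int × Int))) :
    ∀ (mv : Int) (ml : List (List Int)),
    L.foldl (pvStep cap) (mv, ml) =
      (pvBest cap mv L,
        (if pvBest cap mv L = mv then ml else []) ++
          (L.filter (fun pq => pq.1.2 + pq.2.2 == pvBest cap mv L)).map
            (fun pq => [pq.1.1, pq.2.1])) := by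
  induction L with
  | nil => intro mv ml; simp [pvBest]
  | cons pq t ih =>
    intro mv ml
    rw [List.foldl_cons, pvBest_cons]
    by_cases h : pq.1.2 + pq.2.2 > mv ∧ pq.1.2 + pq.2.2 ≤ cap
    · -- reset branch
      rw [if_pos h]
      have hstep : pvStep cap (mv, ml) pq = (pq.1.2 + pq.2.2, [[pq.1.1, pq.2.1]]) := by
        simp [pvStep, h]
      rw [hstep, ih]
      have hge : pq.1.2 + pq.2.2 ≤ pvBest cap (pq.1.2 + pq.2.2) t := pvBest_ge cap t _
      have hne : pvBest cap (pq.1.2 + pq.2.2) t ≠ mv := by omega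
      rw [if_neg hne]
      by_cases hs : pq.1.2 + pq.2.2 = pvBest cap (pq.1.2 + pq.2.2) t
      · rw [List.filter_cons_of_pos (by simpa using hs), List.map_cons, if_pos hs.symm]
        simp
      · rw [List.filter_cons_of_neg (by simpa using hs), if_neg (fun hc => hs hc.symm)]
    · rw [if_neg h]
      by_cases h2 : pq.1.2 + pq.2.2 = mv
      · have hstep : pvStep cap (mv, ml) pq = (mv, ml ++ [[pq.1.1, pq.2.1]]) := by
          simp [pvStep, h2]
        rw [hstep, ih]
        by_cases hb : pvBest cap mv t = mv
        · rw [if_pos hb, if_pos hb, List.filter_cons_of_pos (by simp [h2, hb]), List.map_cons]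
          simp
        · rw [if_neg hb, if_neg hb, List.filter_cons_of_neg (by simp [h2]; omega)]
      · have hstep : pvStep cap (mv, ml) pq = (mv, ml) := by
          simp [pvStep, h, h2]
        rw [hstep, ih]
        have hne : pq.1.2 + pq.2.2 ≠ pvBest cap mv t := by
          intro hc
          rcases pvBest_cases cap t mv with hb | ⟨q, hq, hb, hcap⟩
          · exact h2 (hc.trans hb)
          · have hgemv := pvBest_ge cap t mv
            rcases not_and_or.mp h with h' | h'
            · omega
            · rw [← hc] at hcap; exact h' hcap
        rw [List.filter_cons_of_neg (by simpa using hne)]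

def pvPairs (F B : List (Int × Int)) : List ((Int × Int) × (Int × Int)) :=
  F.flatMap (fun p => B.map (fun q => (p, q)))

lemma nested_foldl (F B : List (Int × Int)) (g : (Int × List (List Int)) → ((Int × Int) × (Int × Int)) → (Int × List (List Int))) :
    ∀ st, F.foldl (fun st p => B.foldl (fun st q => g st (p, q)) st) st =
      (pvPairs F B).foldl g st := by
  induction F with
  | nil => intro st; simp [pvPairs]
  | cons p F ih =>
    intro st
    simp only [pvPairs, List.flatMap_cons, List.foldl_cons, List.foldl_append, List.foldl_map]
    rw [ih]
    rfl


lemma bsr_spec (arr : List Int) (x : Int) :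
    ∀ fuel lo hi, hi - lo ≤ fuel → lo ≤ hi → hi ≤ arr.length →
      (lo > 0 → arr.getD (lo - 1) 0 ≤ x) → (hi < arr.length → x < arr.getD hi 0) →
      lo ≤ bsr arr x lo hi ∧ bsr arr x lo hi ≤ hi ∧
        (bsr arr x lo hi > 0 → arr.getD (bsr arr x lo hi - 1) 0 ≤ x) ∧
        (bsr arr x lo hi < arr.length → x < arr.getD (bsr arr x lo hi) 0) := by
  intro fuel
  induction fuel with
  | zero =>
    intro lo hi hf hle hlen h1 h2
    have : lo = hi := by omega
    subst this
    rw [bsr, dif_neg (by omega)]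
    exact ⟨le_refl _, le_refl _, h1, h2⟩
  | succ n ih =>
    intro lo hi hf hle hlen h1 h2
    by_cases h : lo < hi
    · rw [bsr, dif_pos h]
      simp only
      by_cases hm : arr.getD ((lo + hi) / 2) 0 ≤ x
      · rw [if_pos hm]
        obtain ⟨a, b, c, d⟩ := ih ((lo + hi) / 2 + 1) hi (by omega) (by omega) hlen
          (fun _ => by simpa using hm) h2
        exact ⟨by omega, b, c, d⟩
      · rw [if_neg hm]
        obtain ⟨a, b, c, d⟩ := ih lo ((lo + hi) / 2) (by omega) (by omega) (by omega) h1
          (fun _ => by omega)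
        exact ⟨a, by omega, c, d⟩
    · have : lo = hi := by omega
      subst this
      rw [bsr, dif_neg (by omega)]
      exact ⟨le_refl _, le_refl _, h1, h2⟩

lemma bsr_max (arr : List Int) (hp : arr.Pairwise (· ≤ ·)) (x : Int) :
    (bsr arr x 0 arr.length = 0 → ∀ bv ∈ arr, x < bv) ∧
    (bsr arr x 0 arr.length > 0 →
      bsr arr x 0 arr.length - 1 < arr.length ∧
      arr.getD (bsr arr x 0 arr.length - 1) 0 ≤ x ∧
      ∀ bv ∈ arr, bv ≤ x → bv ≤ arr.getD (bsr arr x 0 arr.length - 1) 0) := by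
  have hmono : ∀ i j : Nat, i ≤ j → j < arr.length → arr.getD i 0 ≤ arr.getD j 0 := by
    intro i j hij hj
    rw [List.getD_eq_getElem _ _ (show i < arr.length by omega), List.getD_eq_getElem _ _ hj]
    rcases eq_or_lt_of_le hij with rfl | hlt
    · exact le_refl _
    · exact (List.pairwise_iff_getElem.mp hp) i j (by omega) hj hlt
  obtain ⟨_, hle, hc, hd⟩ := bsr_spec arr x (arr.length) 0 arr.length (by omega) (by omega)
    (le_refl _) (by omega) (fun h => absurd h (by omega))
  set r := bsr arr x 0 arr.length with hr
  constructor
  · intro h0 bv hmem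
    obtain ⟨k, hk, rfl⟩ := List.mem_iff_getElem.mp hmem
    rw [show (arr[k] : Int) = arr.getD k 0 from (List.getD_eq_getElem _ _ hk).symm]
    have hx : x < arr.getD r 0 := hd (by omega)
    rw [h0] at hx
    exact lt_of_lt_of_le hx (hmono 0 k (by omega) hk)
  · intro hpos
    have hlt : r - 1 < arr.length := by omega
    refine ⟨hlt, hc hpos, ?_⟩
    intro bv hmem hbv
    obtain ⟨k, hk, rfl⟩ := List.mem_iff_getElem.mp hmem
    rw [show (arr[k] : Int) = arr.getD k 0 from (List.getD_eq_getElem _ _ hk).symm] at hbv ⊢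
    by_cases hkr : k ≤ r - 1
    · exact hmono k (r - 1) hkr hlt
    · exfalso
      have hx : x < arr.getD r 0 := hd (by omega)
      have := hmono r k (by omega) hk
      omega

def pvBStep (cap : Int) (bvals : List Int) (best fv : Int) : Int :=
  if bsr bvals (cap - fv) 0 bvals.length > 0 then
    if fv + bvals.getD (bsr bvals (cap - fv) 0 bvals.length - 1) 0 > best then
      fv + bvals.getD (bsr bvals (cap - fv) 0 bvals.length - 1) 0
    else best
  else best

lemma pvBStep_ge (cap : Int) (bvals : List Int) (acc fv : Int) :
    acc ≤ pvBStep cap bvals acc fv := by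
  unfold pvBStep
  split_ifs <;> omega

lemma pvBStep_cases (cap : Int) (bvals : List Int) (hp : bvals.Pairwise (· ≤ ·)) (acc fv : Int) :
    pvBStep cap bvals acc fv = acc ∨
      ∃ bv ∈ bvals, pvBStep cap bvals acc fv = fv + bv ∧ pvBStep cap bvals acc fv ≤ cap := by
  unfold pvBStep
  split_ifs with h1 h2
  · right
    obtain ⟨hlt, hle, _⟩ := (bsr_max bvals hp (cap - fv)).2 h1
    refine ⟨bvals.getD (bsr bvals (cap - fv) 0 bvals.length - 1) 0, ?_, rfl, by omega⟩
    rw [List.getD_eq_getElem _ _ hlt]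
    exact List.getElem_mem hlt
  · left; rfl
  · left; rfl

lemma pvBStep_ub (cap : Int) (bvals : List Int) (hp : bvals.Pairwise (· ≤ ·)) (acc fv : Int) :
    ∀ bv ∈ bvals, fv + bv ≤ cap → fv + bv ≤ pvBStep cap bvals acc fv := by
  intro bv hmem hcap
  unfold pvBStep
  split_ifs with h1 h2
  · obtain ⟨hlt, hle, hub⟩ := (bsr_max bvals hp (cap - fv)).2 h1
    have := hub bv hmem (by omega)
    omega
  · obtain ⟨hlt, hle, hub⟩ := (bsr_max bvals hp (cap - fv)).2 h1
    have := hub bv hmem (by omega)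
    omega
  · have := (bsr_max bvals hp (cap - fv)).1 (by omega) bv hmem
    omega

lemma pvBFold_ge (cap : Int) (bvals : List Int) (vs : List Int) :
    ∀ acc : Int, acc ≤ vs.foldl (pvBStep cap bvals) acc := by
  induction vs with
  | nil => intro acc; simp
  | cons v t ih =>
    intro acc
    exact le_trans (pvBStep_ge cap bvals acc v) (ih _)

lemma pvBFold_cases (cap : Int) (bvals : List Int) (hp : bvals.Pairwise (· ≤ ·)) (vs : List Int) :
    ∀ acc : Int, vs.foldl (pvBStep cap bvals) acc = acc ∨
      ∃ fv ∈ vs, ∃ bv ∈ bvals, vs.foldl (pvBStep cap bvals) acc = fv + bv ∧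
        vs.foldl (pvBStep cap bvals) acc ≤ cap := by
  induction vs with
  | nil => intro acc; left; simp
  | cons v t ih =>
    intro acc
    rw [List.foldl_cons]
    rcases ih (pvBStep cap bvals acc v) with h | ⟨fv, hfv, bv, hbv, h1, h2⟩
    · rw [h]
      rcases pvBStep_cases cap bvals hp acc v with h' | ⟨bv, hbv, h1, h2⟩
      · left; exact h'
      · right; exact ⟨v, by simp, bv, hbv, h1, h2⟩
    · right; exact ⟨fv, by simp [hfv], bv, hbv, h1, h2⟩

lemma pvBFold_ub (cap : Int) (bvals : List Int) (hp : bvals.Pairwise (· ≤ ·)) (vs : List Int) :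
    ∀ acc : Int, ∀ fv ∈ vs, ∀ bv ∈ bvals, fv + bv ≤ cap →
      fv + bv ≤ vs.foldl (pvBStep cap bvals) acc := by
  induction vs with
  | nil => intro acc fv h; simp at h
  | cons v t ih =>
    intro acc fv hmem bv hbv hcap
    rw [List.foldl_cons]
    rcases List.mem_cons.mp hmem with rfl | hmem
    · exact le_trans (pvBStep_ub cap bvals hp acc fv bv hbv hcap) (pvBFold_ge cap bvals t _)
    · exact ih _ fv hmem bv hbv hcap


-- groups.get(v, []) is the keys of b whose value is v, in order
lemma groups_getD (B : List (Int × Int)) (c : Int) :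
    (B.foldl (fun g q => g.modify q.2 [] (fun l => l ++ [q.1])) (PySem.Dict.empty : PySem.Dict Int (List Int))).getD c [] =
      (B.filter (fun q => q.2 == c)).map (fun q => q.1) := by
  have h : B.foldl (fun g q => g.modify q.2 [] (fun l => l ++ [q.1])) (PySem.Dict.empty : PySem.Dict Int (List Int)) =
      (B.map (fun q => (q.2, q.1))).foldl (fun d p => d.modify p.1 [] (fun l => l ++ [p.2])) PySem.Dict.empty := by
    rw [List.foldl_map]
  rw [h, PySem.Dict.getD_foldl_modify_append]
  simp [List.filter_map, Function.comp_def]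

lemma filter_pvPairs (F B : List (Int × Int)) (M : Int) :
    ((pvPairs F B).filter (fun pq => pq.1.2 + pq.2.2 == M)).map (fun pq => [pq.1.1, pq.2.1]) =
      F.flatMap (fun p => ((B.filter (fun q => q.2 == M - p.2)).map (fun q => q.1)).map (fun t => [p.1, t])) := by
  unfold pvPairs
  induction F with
  | nil => simp
  | cons p F ih =>
    simp only [List.flatMap_cons, List.filter_append, List.map_append, ih]
    congr 1
    rw [List.filter_map, List.map_map]
    have hc : (fun q : Int × Int => q.2 == M - p.2) = ((fun pq : (Int × Int) × (Int × Int) => pq.1.2 + pq.2.2 == M) ∘ (fun q => (p, q))) := by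
      funext q
      simp only [Function.comp_apply]
      by_cases h : q.2 = M - p.2
      · simp [h]
      · simp [h, show ¬ p.2 + q.2 = M by omega]
    rw [← hc, List.map_map]
    rfl

lemma mem_pvPairs (F B : List (Int × Int)) (pq : (Int × Int) × (Int × Int)) :
    pq ∈ pvPairs F B ↔ pq.1 ∈ F ∧ pq.2 ∈ B := by
  simp only [pvPairs, List.mem_flatMap, List.mem_map]
  constructor
  · rintro ⟨p, hp, q, hq, rfl⟩; exact ⟨hp, hq⟩
  · rintro ⟨h1, h2⟩; exact ⟨pq.1, h1, pq.2, h2, rfl⟩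

lemma main_eq (cap : Int) (fg bg : List (Int × Int)) :
    optimalPair cap fg bg = optimalPair_alt cap fg bg := by
  have hf : (PySem.Dict.ofList fg : PySem.Dict Int Int).keys.Nodup := PySem.Dict.nodup_keys_ofList _
  have hb : (PySem.Dict.ofList bg : PySem.Dict Int Int).keys.Nodup := PySem.Dict.nodup_keys_ofList _
  have hp : (PySem.List.sorted (PySem.Dict.ofList bg : PySem.Dict Int Int).values (fun v => v) false).Pairwise (· ≤ ·) :=
    PySem.List.sorted_pairwise _ _
  have hA : optimalPair cap fg bg =
      ((pvPairs (PySem.Dict.ofList fg : PySem.Dict Int Int).items (PySem.Dict.ofList bg : PySem.Dict Int Int).items).foldl (pvStep cap) (0, [])).2 := by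
    rw [← nested_foldl, PySem.Dict.items_eq_map_keys _ hf 0, PySem.Dict.items_eq_map_keys _ hb 0]
    simp only [List.foldl_map]
    rfl
  have hM : (PySem.Dict.ofList fg : PySem.Dict Int Int).values.foldl
        (pvBStep cap (PySem.List.sorted (PySem.Dict.ofList bg : PySem.Dict Int Int).values (fun v => v) false)) 0 =
      pvBest cap 0 (pvPairs (PySem.Dict.ofList fg : PySem.Dict Int Int).items (PySem.Dict.ofList bg : PySem.Dict Int Int).items) := by
    apply le_antisymm
    · rcases pvBFold_cases cap _ hp (PySem.Dict.ofList fg : PySem.Dict Int Int).values 0 with h | ⟨fv, hfv, bv, hbv, h1, h2⟩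
      · rw [h]; exact pvBest_ge cap _ 0
      · rw [h1]
        have hbv' : bv ∈ (PySem.Dict.ofList bg : PySem.Dict Int Int).values := (PySem.List.mem_sorted _ _ _ _).mp hbv
        obtain ⟨p, hpF, rfl⟩ := List.mem_map.mp hfv
        obtain ⟨q, hqB, rfl⟩ := List.mem_map.mp hbv'
        exact pvBest_ub cap _ 0 (p, q) ((mem_pvPairs _ _ _).mpr ⟨hpF, hqB⟩) (h1 ▸ h2)
    · rcases pvBest_cases cap (pvPairs (PySem.Dict.ofList fg : PySem.Dict Int Int).items (PySem.Dict.ofList bg : PySem.Dict Int Int).items) 0 with h | ⟨pq, hpq, h1, h2⟩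
      · rw [h]; exact pvBFold_ge cap _ _ 0
      · rw [h1]
        obtain ⟨hpF, hqB⟩ := (mem_pvPairs _ _ _).mp hpq
        exact pvBFold_ub cap _ hp _ 0 pq.1.2 (List.mem_map.mpr ⟨pq.1, hpF, rfl⟩) pq.2.2
          ((PySem.List.mem_sorted _ _ _ _).mpr (List.mem_map.mpr ⟨pq.2, hqB, rfl⟩)) (h1 ▸ h2)
  have hBalt : optimalPair_alt cap fg bg =
      (PySem.Dict.ofList fg : PySem.Dict Int Int).items.flatMap (fun p =>
        (((PySem.Dict.ofList bg : PySem.Dict Int Int).items.foldl (fun g q => g.modify q.2 [] (fun l => l ++ [q.1])) PySem.Dict.empty).getD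
          (((PySem.Dict.ofList fg : PySem.Dict Int Int).values.foldl
            (pvBStep cap (PySem.List.sorted (PySem.Dict.ofList bg : PySem.Dict Int Int).values (fun v => v) false)) 0) - p.2) []).map
          (fun t => [p.1, t])) := rfl
  rw [hA, foldl_pvStep, hBalt]
  simp only [groups_getD, hM, ite_self, List.nil_append]
  exact filter_pvPairs _ _ _

-- ===== VERDICT (by name: the statement is the Claim_ definition above) =====
theorem optimalPair_spec : Claim_equal_optimalPair := by
  intro cap fg bg _
  show optimalPair cap fg bg = optimalPair_alt cap fg bg
  exact main_eq cap fg bg
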